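-- pv_equiv track=rewrite | github.com/klymenok/leetcode | sudoku-solver/main.py | get_square_coordinates
-- ===== SOURCE A (Python) =====
-- def get_square_coordinates(line, cell):
--     start_line, start_cell = line - line % 3, cell - cell % 3
--     end_cell = start_cell + 2
--     for _ in range(9):
--         if start_cell > end_cell:
--             start_cell -= 3
--             start_line += 1
--         yield [start_line, start_cell]
--         start_cell += 1
-- ===== SOURCE B (Python) =====
-- def get_square_coordinates(line, cell):
--     start_line, start_cell = line - line % 3, cell - cell % 3
--     for i in range(start_line, start_line + 3):
--         for j in range(start_cell, start_cell + 3):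
--             yield [i, j]
-- ===== Notes on version B (the rewrite author's own statement) =====
-- stated objective: simpler
-- what changed: B replaces A's single 9-step loop with a stateful wrap-around counter (conditional row bump and column reset) by two plain nested range loops over the 3x3 block, with no mutable loop state.
import Mathlib
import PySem

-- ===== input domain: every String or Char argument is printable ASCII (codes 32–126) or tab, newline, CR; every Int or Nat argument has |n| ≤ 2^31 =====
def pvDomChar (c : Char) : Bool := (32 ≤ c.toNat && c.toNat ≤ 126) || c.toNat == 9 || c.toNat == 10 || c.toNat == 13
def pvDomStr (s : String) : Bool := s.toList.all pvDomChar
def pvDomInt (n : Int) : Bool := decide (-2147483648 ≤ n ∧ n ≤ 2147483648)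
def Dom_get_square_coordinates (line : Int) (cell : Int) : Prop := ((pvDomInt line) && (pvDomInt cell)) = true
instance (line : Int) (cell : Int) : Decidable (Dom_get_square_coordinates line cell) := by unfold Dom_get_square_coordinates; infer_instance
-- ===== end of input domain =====

-- B replaces A's flat 9-step loop with a wrap-around counter by two nested range loops over the 3×3 block (simpler decomposition).

-- ===== PORT A =====
-- A is a generator: the port returns the list of the 9 yielded values.  The for loop
-- over range(9) becomes a fold of the one-iteration step pvStepA over the state
-- (start_line, start_cell, acc), exactly mirroring the wrap-around counter.
def pvStepA (end_cell : Int) (st : Int × Int × List (List Int)) : Int × Int × List (List Int) :=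
  let p := if st.2.1 > end_cell then (st.1 + 1, st.2.1 - 3) else (st.1, st.2.1)
  (p.1, p.2 + 1, st.2.2 ++ [[p.1, p.2]])

def get_square_coordinates (line : Int) (cell : Int) : List (List Int) :=
  let start_line := line - PySem.Int.mod line 3
  let start_cell := cell - PySem.Int.mod cell 3
  let end_cell := start_cell + 2
  ((List.range 9).foldl (fun st _ => pvStepA end_cell st) (start_line, start_cell, [])).2.2

-- ===== PORT B =====
def get_square_coordinates_alt (line : Int) (cell : Int) : List (List Int) :=
  let start_line := line - PySem.Int.mod line 3
  let start_cell := cell - PySem.Int.mod cell 3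
  (PySem.List.pyRange start_line (start_line + 3) 1).flatMap (fun i =>
    (PySem.List.pyRange start_cell (start_cell + 3) 1).map (fun j => [i, j]))

-- ===== PRECONDITION & SPEC =====
def Spec_get_square_coordinates (line : Int) (cell : Int) (out : List (List Int)) : Prop := out = get_square_coordinates_alt line cell
instance (line : Int) (cell : Int) (out : List (List Int)) : Decidable (Spec_get_square_coordinates line cell out) := by unfold Spec_get_square_coordinates; infer_instance

-- ===== CLAIM (what is proved, stated in full; the proofs are below) =====
def Claim_equal_get_square_coordinates : Prop := ∀ (line : Int) (cell : Int), Dom_get_square_coordinates line cell → Spec_get_square_coordinates line cell (get_square_coordinates line cell)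

-- ===== LEMMAS AND PROOFS =====

-- Both sides depend only on sl = line - line%3 and sc = cell - cell%3; unroll both.
theorem stepA_no (e sl sc : Int) (acc : List (List Int)) (h : ¬ sc > e) :
    pvStepA e (sl, sc, acc) = (sl, sc + 1, acc ++ [[sl, sc]]) := by
  simp only [pvStepA]; rw [if_neg h]

theorem stepA_yes (e sl sc : Int) (acc : List (List Int)) (h : sc > e) :
    pvStepA e (sl, sc, acc) = (sl + 1, sc - 3 + 1, acc ++ [[sl + 1, sc - 3]]) := by
  simp only [pvStepA]; rw [if_pos h]

theorem both_unrolled (sl sc : Int) :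
    ((List.range 9).foldl (fun st _ => pvStepA (sc + 2) st) (sl, sc, [])).2.2
    = (PySem.List.pyRange sl (sl + 3) 1).flatMap (fun i =>
        (PySem.List.pyRange sc (sc + 3) 1).map (fun j => [i, j])) := by
  have h1 : PySem.List.pyRange sl (sl + 3) 1 = [sl, sl + 1, sl + 1 + 1] := by
    rw [PySem.List.pyRange_one_cons (by omega), PySem.List.pyRange_one_cons (by omega),
        PySem.List.pyRange_one_cons (by omega), PySem.List.pyRange_one_eq_nil (by omega)]
  have h2 : PySem.List.pyRange sc (sc + 3) 1 = [sc, sc + 1, sc + 1 + 1] := by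
    rw [PySem.List.pyRange_one_cons (by omega), PySem.List.pyRange_one_cons (by omega),
        PySem.List.pyRange_one_cons (by omega), PySem.List.pyRange_one_eq_nil (by omega)]
  have hr : List.range 9 = [0, 1, 2, 3, 4, 5, 6, 7, 8] := by decide
  rw [h1, h2, hr]
  simp only [List.foldl_cons, List.foldl_nil]
  have t0 : pvStepA (sc + 2) (sl, sc, []) = (sl, sc + 1, [[sl, sc]]) := by
    rw [stepA_no _ _ _ _ (by omega)]; rfl
  have t1 : pvStepA (sc + 2) (sl, sc + 1, [[sl, sc]]) = (sl, sc + 1 + 1, [[sl, sc], [sl, sc + 1]]) := by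
    rw [stepA_no _ _ _ _ (by omega)]; rfl
  have t2 : pvStepA (sc + 2) (sl, sc + 1 + 1, [[sl, sc], [sl, sc + 1]]) = (sl, sc + 1 + 1 + 1, [[sl, sc], [sl, sc + 1], [sl, sc + 1 + 1]]) := by
    rw [stepA_no _ _ _ _ (by omega)]; rfl
  have t3 : pvStepA (sc + 2) (sl, sc + 1 + 1 + 1, [[sl, sc], [sl, sc + 1], [sl, sc + 1 + 1]]) = (sl + 1, sc + 1 + 1 + 1 - 3 + 1, [[sl, sc], [sl, sc + 1], [sl, sc + 1 + 1], [sl + 1, sc + 1 + 1 + 1 - 3]]) := by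
    rw [stepA_yes _ _ _ _ (by omega)]; rfl
  have t4 : pvStepA (sc + 2) (sl + 1, sc + 1 + 1 + 1 - 3 + 1, [[sl, sc], [sl, sc + 1], [sl, sc + 1 + 1], [sl + 1, sc + 1 + 1 + 1 - 3]]) = (sl + 1, sc + 1 + 1 + 1 - 3 + 1 + 1, [[sl, sc], [sl, sc + 1], [sl, sc + 1 + 1], [sl + 1, sc + 1 + 1 + 1 - 3], [sl + 1, sc + 1 + 1 + 1 - 3 + 1]]) := by
    rw [stepA_no _ _ _ _ (by omega)]; rfl
  have t5 : pvStepA (sc + 2) (sl + 1, sc + 1 + 1 + 1 - 3 + 1 + 1, [[sl, sc], [sl, sc + 1], [sl, sc + 1 + 1], [sl + 1, sc + 1 + 1 + 1 - 3], [sl + 1, sc + 1 + 1 + 1 - 3 + 1]]) = (sl + 1, sc + 1 + 1 + 1 - 3 + 1 + 1 + 1, [[sl, sc], [sl, sc + 1], [sl, sc + 1 + 1], [sl + 1, sc + 1 + 1 + 1 - 3], [sl + 1, sc + 1 + 1 + 1 - 3 + 1], [sl + 1, sc + 1 + 1 + 1 - 3 + 1 + 1]]) := by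
    rw [stepA_no _ _ _ _ (by omega)]; rfl
  have t6 : pvStepA (sc + 2) (sl + 1, sc + 1 + 1 + 1 - 3 + 1 + 1 + 1, [[sl, sc], [sl, sc + 1], [sl, sc + 1 + 1], [sl + 1, sc + 1 + 1 + 1 - 3], [sl + 1, sc + 1 + 1 + 1 - 3 + 1], [sl + 1, sc + 1 + 1 + 1 - 3 + 1 + 1]]) = (sl + 1 + 1, sc + 1 + 1 + 1 - 3 + 1 + 1 + 1 - 3 + 1, [[sl, sc], [sl, sc + 1], [sl, sc + 1 + 1], [sl + 1, sc + 1 + 1 + 1 - 3], [sl + 1, sc + 1 + 1 + 1 - 3 + 1], [sl + 1, sc + 1 + 1 + 1 - 3 + 1 + 1], [sl + 1 + 1, sc + 1 + 1 + 1 - 3 + 1 + 1 + 1 - 3]]) := by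
    rw [stepA_yes _ _ _ _ (by omega)]; rfl
  have t7 : pvStepA (sc + 2) (sl + 1 + 1, sc + 1 + 1 + 1 - 3 + 1 + 1 + 1 - 3 + 1, [[sl, sc], [sl, sc + 1], [sl, sc + 1 + 1], [sl + 1, sc + 1 + 1 + 1 - 3], [sl + 1, sc + 1 + 1 + 1 - 3 + 1], [sl + 1, sc + 1 + 1 + 1 - 3 + 1 + 1], [sl + 1 + 1, sc + 1 + 1 + 1 - 3 + 1 + 1 + 1 - 3]]) = (sl + 1 + 1, sc + 1 + 1 + 1 - 3 + 1 + 1 + 1 - 3 + 1 + 1, [[sl, sc], [sl, sc + 1], [sl, sc + 1 + 1], [sl + 1, sc + 1 + 1 + 1 - 3], [sl + 1, sc + 1 + 1 + 1 - 3 + 1], [sl + 1, sc + 1 + 1 + 1 - 3 + 1 + 1], [sl + 1 + 1, sc + 1 + 1 + 1 - 3 + 1 + 1 + 1 - 3], [sl + 1 + 1, sc + 1 + 1 + 1 - 3 + 1 + 1 + 1 - 3 + 1]]) := by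
    rw [stepA_no _ _ _ _ (by omega)]; rfl
  have t8 : pvStepA (sc + 2) (sl + 1 + 1, sc + 1 + 1 + 1 - 3 + 1 + 1 + 1 - 3 + 1 + 1, [[sl, sc], [sl, sc + 1], [sl, sc + 1 + 1], [sl + 1, sc + 1 + 1 + 1 - 3], [sl + 1, sc + 1 + 1 + 1 - 3 + 1], [sl + 1, sc + 1 + 1 + 1 - 3 + 1 + 1], [sl + 1 + 1, sc + 1 + 1 + 1 - 3 + 1 + 1 + 1 - 3], [sl + 1 + 1, sc + 1 + 1 + 1 - 3 + 1 + 1 + 1 - 3 + 1]]) = (sl + 1 + 1, sc + 1 + 1 + 1 - 3 + 1 + 1 + 1 - 3 + 1 + 1 + 1, [[sl, sc], [sl, sc + 1], [sl, sc + 1 + 1], [sl + 1, sc + 1 + 1 + 1 - 3], [sl + 1, sc + 1 + 1 + 1 - 3 + 1], [sl + 1, sc + 1 + 1 + 1 - 3 + 1 + 1], [sl + 1 + 1, sc + 1 + 1 + 1 - 3 + 1 + 1 + 1 - 3], [sl + 1 + 1, sc + 1 + 1 + 1 - 3 + 1 + 1 + 1 - 3 + 1], [sl + 1 + 1, sc +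 1 + 1 + 1 - 3 + 1 + 1 + 1 - 3 + 1 + 1]]) := by
    rw [stepA_no _ _ _ _ (by omega)]; rfl
  rw [t0, t1, t2, t3, t4, t5, t6, t7, t8]
  simp only [List.flatMap_cons, List.flatMap_nil, List.map_cons, List.map_nil,
    List.nil_append, List.cons_append, List.append_nil]
  norm_num
  omega

-- ===== VERDICT (by name: the statement is the Claim_ definition above) =====
theorem get_square_coordinates_spec : Claim_equal_get_square_coordinates := by
  intro line cell _
  unfold Spec_get_square_coordinates get_square_coordinates get_square_coordinates_alt
  exact both_unrolled _ _
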